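-- pv_equiv track=rewrite | github.com/Nelu251/LFPC | Lab3.py | split_t
-- ===== SOURCE A (Python) =====
-- def split_t(string):
--     splitted = []
--     old_s = ''
--     for s in string:
--         if s.isdigit():
--            old_s += s
--         else:
--             splitted.append(old_s)
--             old_s = s
--     splitted.remove('')
--     splitted.append(old_s)
--     return splitted
-- ===== SOURCE B (Python) =====
-- def split_t(string):
--     # Two-pointer scan: each token starts at i, the inner scan extends it over
--     # the following digit run, and the token is taken as a slice.
--     tokens = []
--     n = len(string)
--     i = 0
--     while i < n:
--         j = i + 1
--         while j < n and string[j].isdigit():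
--             j += 1
--         tokens.append(string[i:j])
--         i = j
--     return tokens
-- ===== Notes on version B (the rewrite author's own statement) =====
-- stated objective: alternative
-- what changed: Replaced A's char-by-char accumulator with the append-then-list.remove('') hack by a two-pointer scan that finds each token's digit-run end and emits string slices.
-- outside the precondition, e.g. on split_t(''): A raises ValueError, B returns []; on split_t('1a'): A raises ValueError, B returns ['1', 'a']
-- crash fix: On the empty string and on strings starting with a digit A raises ValueError (splitted.remove('') finds no ''); B returns the token list with the leading digit run as its own token. — e.g. on split_t("1a"): A raises ValueError, B returns ["1", "a"]
import Mathlib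
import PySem

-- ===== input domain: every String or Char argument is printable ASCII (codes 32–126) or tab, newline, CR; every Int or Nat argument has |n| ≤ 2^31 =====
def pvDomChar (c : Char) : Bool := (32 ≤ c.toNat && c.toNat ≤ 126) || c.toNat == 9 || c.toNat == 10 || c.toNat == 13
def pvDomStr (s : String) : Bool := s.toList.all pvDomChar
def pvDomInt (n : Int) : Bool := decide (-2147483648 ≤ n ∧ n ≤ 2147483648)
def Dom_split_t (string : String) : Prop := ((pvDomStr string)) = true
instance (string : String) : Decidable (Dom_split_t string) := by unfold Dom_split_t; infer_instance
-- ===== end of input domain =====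

-- B replaces A's char-accumulator + list.remove('') hack with a two-pointer scan that
-- emits slices; equivalence of the RETURN value is proved on Pre_ (A raises elsewhere).

-- ===== PORT A =====
-- for-loop state: (splitted, old_s); old_s kept as List Char, pushed as a String
def split_t (string : String) : List String :=
  let st := string.toList.foldl
    (fun (st : List String × List Char) s =>
      if PySem.Chars.isdigit s then (st.1, st.2 ++ [s])
      else (st.1 ++ [String.ofList st.2], [s]))
    ([], [])
  match PySem.List.remove? st.1 "" with
  | some splitted => splitted ++ [String.ofList st.2]
  | none => []   -- splitted.remove('') raises ValueError here; excluded by Pre_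

-- ===== PORT B =====
-- inner while: 'while j < n and string[j].isdigit(): j += 1' (j < n guards the index)
def altScan (cs : List Char) (n j : Nat) : Nat :=
  if j < n ∧ PySem.Chars.isdigit (cs.getD j ' ') then altScan cs n (j + 1) else j
termination_by n - j
decreasing_by omega

theorem altScan_ge (cs : List Char) (n j : Nat) : j ≤ altScan cs n j := by
  unfold altScan
  split
  · exact Nat.le_trans (Nat.le_succ j) (altScan_ge cs n (j + 1))
  · exact Nat.le_refl j
termination_by n - j
decreasing_by rename_i h; omega

-- outer while over i; string[i:j] is PySem slice
def altLoop (cs : List Char) (n i : Nat) : List String :=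
  if i < n then
    String.ofList (PySem.List.slice cs (some (i : Int)) (some ((altScan cs n (i + 1)) : Int)))
      :: altLoop cs n (altScan cs n (i + 1))
  else []
termination_by n - i
decreasing_by have := altScan_ge cs n (i + 1); omega

def split_t_alt (string : String) : List String :=
  altLoop string.toList string.toList.length 0

-- ===== PRECONDITION & SPEC =====
-- Pre_ excludes exactly the inputs on which A raises ValueError (splitted.remove('')):
-- the empty string and strings whose first character is a digit.
def Pre_split_t (string : String) : Prop :=
  string.toList ≠ [] ∧ PySem.Chars.isdigit (string.toList.headD ' ') = false
instance (string : String) : Decidable (Pre_split_t string) := by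
  unfold Pre_split_t; infer_instance
def pvWitness_split_t : String := "a12b3"

-- On empty or digit-leading strings A raises ValueError (list.remove('') finds no '');
-- B returns the token list with the leading digit run as its own token.
def Raises_split_t (string : String) : Prop :=
  string.toList = [] ∨ PySem.Chars.isdigit (string.toList.headD ' ') = true
instance (string : String) : Decidable (Raises_split_t string) := by
  unfold Raises_split_t; infer_instance
def pvRaiseWitness_split_t : String := "1a"
def pvRaiseWitnessOut_split_t : List String := ["1", "a"]

def Spec_split_t (string : String) (out : List String) : Prop := out = split_t_alt string
instance (string : String) (out : List String) : Decidable (Spec_split_t string out) := by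
  unfold Spec_split_t; infer_instance

-- ===== CLAIM (what is proved, stated in full; the proofs are below) =====
def Claim_equal_split_t : Prop :=
  ∀ (string : String), Dom_split_t string → Pre_split_t string →
    Spec_split_t string (split_t string)
def Claim_raises_split_t : Prop :=
  (∀ (string : String), Dom_split_t string → Raises_split_t string → ¬ Pre_split_t string) ∧
  (Dom_split_t (pvRaiseWitness_split_t) ∧ Raises_split_t (pvRaiseWitness_split_t) ∧
    split_t_alt (pvRaiseWitness_split_t) = pvRaiseWitnessOut_split_t)

-- ===== LEMMAS AND PROOFS =====

-- canonical tokenisation: head char plus the following digit run, repeated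
def gatherTokens : List Char → List (List Char)
  | [] => []
  | c :: rest =>
      (c :: rest.takeWhile PySem.Chars.isdigit) :: gatherTokens (rest.dropWhile PySem.Chars.isdigit)
termination_by l => l.length
decreasing_by simpa using Nat.lt_succ_of_le (List.length_dropWhile_le _ _)

-- the meaning of A's in-flight state (old_s = cur)
def gather (cur : List Char) (l : List Char) : List (List Char) :=
  (cur ++ l.takeWhile PySem.Chars.isdigit) :: gatherTokens (l.dropWhile PySem.Chars.isdigit)

theorem gather_head (c : Char) (rest : List Char) :
    gatherTokens (c :: rest) = gather [c] rest := by
  simp [gatherTokens, gather]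

theorem foldA (l : List Char) (sp : List String) (acc : List Char) :
    l.foldl
      (fun (st : List String × List Char) s =>
        if PySem.Chars.isdigit s then (st.1, st.2 ++ [s])
        else (st.1 ++ [String.ofList st.2], [s]))
      (sp, acc)
    = (sp ++ ((gather acc l).dropLast).map String.ofList, (gather acc l).getLastD []) := by
  induction l generalizing sp acc with
  | nil => simp [gather, gatherTokens]
  | cons c rest ih =>
    by_cases h : PySem.Chars.isdigit c
    · have hg : gather acc (c :: rest) = gather (acc ++ [c]) rest := by
        simp [gather, h]
      simp only [List.foldl_cons, h, if_pos, hg]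
      exact ih sp (acc ++ [c])
    · have hg : gather acc (c :: rest) = acc :: gather [c] rest := by
        simp [gather, h, gatherTokens]
      simp only [List.foldl_cons, h, Bool.false_eq_true, if_false, hg]
      rw [ih (sp ++ [String.ofList acc]) [c]]
      have hne : gather [c] rest ≠ [] := by simp [gather]
      simp only [Prod.mk.injEq]
      constructor
      · rw [List.dropLast_cons_of_ne_nil hne]
        simp
      · obtain ⟨a, t, hat⟩ := List.exists_cons_of_ne_nil hne
        simp [hat]

theorem map_dropLast_append_getLastD (f : List Char → String) (g : List (List Char))
    (hg : g ≠ []) : (g.dropLast).map f ++ [f (g.getLastD [])] = g.map f := by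
  have h1 : g.getLastD [] = g.getLast hg := by
    rw [List.getLastD_eq_getLast?, List.getLast?_eq_getLast_of_ne_nil hg]; rfl
  rw [h1, show [f (g.getLast hg)] = List.map f [g.getLast hg] from rfl, ← List.map_append,
    List.dropLast_append_getLast hg]

theorem split_t_eq_gather (c : Char) (rest : List Char) (s : String)
    (hs : s.toList = c :: rest) (hd : PySem.Chars.isdigit c = false) :
    split_t s = (gatherTokens (c :: rest)).map String.ofList := by
  unfold split_t
  rw [hs]
  simp only [List.foldl_cons, hd, Bool.false_eq_true, if_false, List.nil_append]
  rw [foldA rest [String.ofList []] [c]]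
  have h0 : String.ofList ([] : List Char) = "" := rfl
  rw [h0]
  simp only [List.singleton_append, PySem.List.remove?_cons_self]
  rw [map_dropLast_append_getLastD String.ofList _ (by simp [gather]), gather_head]

theorem altScan_eq (cs : List Char) (j : Nat) :
    altScan cs cs.length j = j + ((cs.drop j).takeWhile PySem.Chars.isdigit).length := by
  unfold altScan
  by_cases hj : j < cs.length
  · have hdrop : cs.drop j = cs[j] :: cs.drop (j + 1) := List.drop_eq_getElem_cons hj
    have hget : cs.getD j ' ' = cs[j] := List.getD_eq_getElem cs ' ' hj
    by_cases hdig : PySem.Chars.isdigit cs[j] = true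
    · rw [if_pos ⟨hj, by rw [hget]; exact hdig⟩, altScan_eq cs (j + 1), hdrop,
        List.takeWhile_cons, if_pos hdig]
      simp; omega
    · rw [if_neg (by rw [hget]; tauto), hdrop, List.takeWhile_cons, if_neg hdig]
      simp
  · rw [if_neg (by tauto), List.drop_eq_nil_of_le (by omega)]
    simp
termination_by cs.length - j
decreasing_by omega

theorem altLoop_eq (cs : List Char) (i : Nat) (hi : i ≤ cs.length) :
    altLoop cs cs.length i = (gatherTokens (cs.drop i)).map String.ofList := by
  unfold altLoop
  by_cases h : i < cs.length
  · rw [if_pos h]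
    have hdrop : cs.drop i = cs[i] :: cs.drop (i + 1) := List.drop_eq_getElem_cons h
    have hsplit : cs.drop (i + 1)
        = (cs.drop (i + 1)).takeWhile PySem.Chars.isdigit
          ++ (cs.drop (i + 1)).dropWhile PySem.Chars.isdigit :=
      (List.takeWhile_append_dropWhile).symm
    have htwlen : ((cs.drop (i + 1)).takeWhile PySem.Chars.isdigit).length
        ≤ cs.length - (i + 1) := by
      have h1 := (List.takeWhile_prefix (l := cs.drop (i + 1))
        (p := PySem.Chars.isdigit)).length_le
      simpa using h1
    have hscan : altScan cs cs.length (i + 1)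
        = (i + 1) + ((cs.drop (i + 1)).takeWhile PySem.Chars.isdigit).length :=
      altScan_eq cs (i + 1)
    rw [hscan, PySem.List.slice_natCast]
    have hsub : (i + 1) + ((cs.drop (i + 1)).takeWhile PySem.Chars.isdigit).length - i
        = ((cs.drop (i + 1)).takeWhile PySem.Chars.isdigit).length + 1 := by omega
    rw [hsub, hdrop, List.take_succ_cons]
    have htake : (cs.drop (i + 1)).take
          ((cs.drop (i + 1)).takeWhile PySem.Chars.isdigit).length
        = (cs.drop (i + 1)).takeWhile PySem.Chars.isdigit := by
      have h2 := List.take_left (l₁ := (cs.drop (i + 1)).takeWhile PySem.Chars.isdigit)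
        (l₂ := (cs.drop (i + 1)).dropWhile PySem.Chars.isdigit)
      rw [← hsplit] at h2
      exact h2
    have hdropj : cs.drop ((i + 1) + ((cs.drop (i + 1)).takeWhile PySem.Chars.isdigit).length)
        = (cs.drop (i + 1)).dropWhile PySem.Chars.isdigit := by
      have h2 := List.drop_left (l₁ := (cs.drop (i + 1)).takeWhile PySem.Chars.isdigit)
        (l₂ := (cs.drop (i + 1)).dropWhile PySem.Chars.isdigit)
      rw [← hsplit] at h2
      rw [← List.drop_drop]
      exact h2
    rw [htake, altLoop_eq cs ((i + 1) + ((cs.drop (i + 1)).takeWhile PySem.Chars.isdigit).length)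
        (by omega), hdropj, gatherTokens]
    simp
  · rw [if_neg h]
    have : cs.drop i = [] := List.drop_eq_nil_of_le (by omega)
    rw [this]
    simp [gatherTokens]
termination_by cs.length - i
decreasing_by omega

-- ===== VERDICT (by name: the statement is the Claim_ definition above) =====
theorem split_t_spec : Claim_equal_split_t := by
  intro s _ hpre
  unfold Spec_split_t
  obtain ⟨hne, hd⟩ := hpre
  obtain ⟨c, rest, hs⟩ := List.exists_cons_of_ne_nil hne
  have hd' : PySem.Chars.isdigit c = false := by simpa [hs] using hd
  rw [split_t_eq_gather c rest s hs hd']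
  unfold split_t_alt
  rw [altLoop_eq s.toList 0 (Nat.zero_le _), List.drop_zero, hs]

theorem witness_alt : split_t_alt "1a" = ["1", "a"] := by
  unfold split_t_alt
  rw [show ("1a" : String).toList = ['1', 'a'] from by decide]
  rw [altLoop_eq _ _ (by simp)]
  have hdig : PySem.Chars.isdigit 'a' = false := by decide
  simp [gatherTokens, List.takeWhile, List.dropWhile, hdig]

@[simp] theorem split_t_raises : Claim_raises_split_t := by
  unfold Claim_raises_split_t
  constructor
  · intro s _ hr hp
    rcases hr with h | h
    · exact hp.1 h
    · rw [hp.2] at h; cases h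
  · refine ⟨by decide, by decide, ?_⟩
    rw [show pvRaiseWitness_split_t = "1a" from rfl,
      show pvRaiseWitnessOut_split_t = ["1", "a"] from rfl]
    exact witness_alt
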